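-- pv_equiv track=rewrite | github.com/SamArdrey/algorithm_practice | unspun/questions.py | list_of_integers
-- ===== SOURCE A (Python) =====
-- def list_of_integers(start, end = 100):
--     """
--     Returns a list of integers from 17 to 100 that are evenly divisible by 11.
--     >>> list_of_integers()
--     [22, 33, 44, 55, 66, 77, 88, 99]
--     """
--     pass
--
--     start = start or 17
--     range = []
--
--     while start <= 100:
--         if start % 11 == 0:
--             range.append(start)
--             start += 11
--         else:
--             start += 1
--
--     return range
-- ===== SOURCE B (Python) =====
-- def list_of_integers(start, end = 100):
--     # Closed-form: align to the first multiple of 11 at/above start, then stride by 11.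
--     start = start or 17
--     first = start + (-start) % 11
--     return list(range(first, 101, 11))
-- ===== Notes on version B (the rewrite author's own statement) =====
-- stated objective: simpler
-- what changed: Replaces the scan-every-integer-and-test-divisibility while loop with an arithmetic alignment to the first multiple of 11 at or above start followed by a single stride-11 range.
import Mathlib
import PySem

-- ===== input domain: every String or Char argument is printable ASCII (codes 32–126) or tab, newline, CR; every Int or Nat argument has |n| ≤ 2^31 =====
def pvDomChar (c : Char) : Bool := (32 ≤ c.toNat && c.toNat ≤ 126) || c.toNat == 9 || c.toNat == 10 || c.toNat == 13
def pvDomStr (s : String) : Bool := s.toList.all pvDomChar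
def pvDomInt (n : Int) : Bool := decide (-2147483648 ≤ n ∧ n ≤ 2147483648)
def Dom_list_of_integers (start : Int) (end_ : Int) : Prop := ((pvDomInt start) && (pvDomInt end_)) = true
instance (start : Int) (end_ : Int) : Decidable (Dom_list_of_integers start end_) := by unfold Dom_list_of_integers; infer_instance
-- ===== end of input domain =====

-- B replaces A's one-by-one scan with divisibility test by an arithmetic alignment
-- to the first multiple of 11 at/above start plus a single stride-11 range (simpler).

-- ===== PORT A =====
-- the 'while start <= 100' loop of A, carrying the growing 'range' list
def pvLoopA (s : Int) (acc : List Int) : List Int :=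
  if _h : s ≤ 100 then
    if PySem.Int.mod s 11 = 0 then pvLoopA (s + 11) (acc ++ [s])
    else pvLoopA (s + 1) acc
  else acc
termination_by (101 - s).toNat
decreasing_by all_goals omega

def list_of_integers (start : Int) (end_ : Int) : List Int :=
  let start := if start = 0 then 17 else start   -- 'start = start or 17'
  pvLoopA start []

-- ===== PORT B =====
def list_of_integers_alt (start : Int) (end_ : Int) : List Int :=
  let start := if start = 0 then 17 else start   -- 'start = start or 17'
  let first := start + PySem.Int.mod (-start) 11
  PySem.List.pyRange first 101 11

-- ===== PRECONDITION & SPEC =====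
def Spec_list_of_integers (start : Int) (end_ : Int) (out : List Int) : Prop := out = list_of_integers_alt start end_
instance (start : Int) (end_ : Int) (out : List Int) : Decidable (Spec_list_of_integers start end_ out) := by unfold Spec_list_of_integers; infer_instance

-- ===== CLAIM (what is proved, stated in full; the proofs are below) =====
def Claim_equal_list_of_integers : Prop := ∀ (start : Int) (end_ : Int), Dom_list_of_integers start end_ → Spec_list_of_integers start end_ (list_of_integers start end_)

-- ===== LEMMAS AND PROOFS =====

theorem pvRange11_nil (a : Int) (h : 101 ≤ a) : PySem.List.pyRange a 101 11 = [] := by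
  rw [PySem.List.pyRange_of_pos _ _ (by norm_num)]
  rw [if_neg (by omega)]
  simp

theorem pvRange11_cons (a : Int) (h : a < 101) :
    PySem.List.pyRange a 101 11 = a :: PySem.List.pyRange (a + 11) 101 11 := by
  rw [PySem.List.pyRange_of_pos _ _ (by norm_num),
      PySem.List.pyRange_of_pos _ _ (by norm_num)]
  have hcount : (if a < 101 then ((101 - a + 11 - 1) / 11).toNat else 0)
      = (if a + 11 < 101 then ((101 - (a + 11) + 11 - 1) / 11).toNat else 0) + 1 := by
    split_ifs <;> omega
  rw [hcount, List.range_succ_eq_map, List.map_cons, List.map_map]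
  refine congrArg₂ _ (by ring) ?_
  refine List.map_congr_left (fun k _ => ?_)
  simp only [Function.comp]
  push_cast
  ring

theorem pvLoopA_eq (s : Int) (acc : List Int) :
    pvLoopA s acc = acc ++ PySem.List.pyRange (s + PySem.Int.mod (-s) 11) 101 11 := by
  fun_induction pvLoopA s acc with
  | case1 s acc h hm ih =>
    have hd : s % 11 = 0 := by
      simpa [PySem.Int.mod, Int.fmod_eq_emod] using hm
    have h1 : (-s).fmod 11 = 0 := by rw [Int.fmod_eq_emod]; omega
    have h2 : (-(s + 11)).fmod 11 = 0 := by rw [Int.fmod_eq_emod]; omega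
    rw [ih]
    simp only [PySem.Int.mod, h1, h2, add_zero]
    rw [pvRange11_cons s (by omega)]
    simp
  | case2 s acc h hm ih =>
    have hd : s % 11 ≠ 0 := by
      simpa [PySem.Int.mod, Int.fmod_eq_emod] using hm
    rw [ih]
    have : s + 1 + PySem.Int.mod (-(s + 1)) 11 = s + PySem.Int.mod (-s) 11 := by
      simp only [PySem.Int.mod, Int.fmod_eq_emod]
      omega
    rw [this]
  | case3 s acc h =>
    rw [pvRange11_nil]
    · simp
    · have : 0 ≤ (-s).fmod 11 := by rw [Int.fmod_eq_emod]; omega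
      simp only [PySem.Int.mod]
      omega

-- ===== VERDICT (by name: the statement is the Claim_ definition above) =====
theorem list_of_integers_spec : Claim_equal_list_of_integers := by
  intro start end_ _
  unfold Spec_list_of_integers list_of_integers list_of_integers_alt
  simp only []
  rw [pvLoopA_eq]
  simp
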